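-- pv_equiv track=rewrite | github.com/jackson147/aoc2024 | day5/p1.py | is_valid_update
-- ===== SOURCE A (Python) =====
-- def is_valid_update(update, rules):
--     for rule in rules:
--         before, after = rule
--
--         if before in update and after in update:
--             index_before = update.index(before)
--             index_after = update.index(after)
--             if index_after < index_before:
--                 return False
--     return True
-- ===== SOURCE B (Python) =====
-- def is_valid_update(update, rules):
--     # reversed traversal: group the rules by their 'before' page once, then one
--     # left-to-right scan of the update -- a page is in place iff none of the
--     # pages that must come after it has already been seen.
--     must_follow = {}
--     for before, after in rules:
--         must_follow.setdefault(before, set()).add(after)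
--     seen = set()
--     for page in update:
--         if page in seen:
--             continue
--         if not must_follow.get(page, set()).isdisjoint(seen):
--             return False
--         seen.add(page)
--     return True
-- ===== Notes on version B (the rewrite author's own statement) =====
-- stated objective: faster
-- what changed: B reverses the traversal: it groups the rules once into a dict mapping each page to the set of pages that must follow it, then makes a single left-to-right scan of the update with a seen-set, failing when a new page's must-follow set intersects the pages already seen, instead of A's loop over rules with repeated in/.index scans of the update; intended as faster (O(N+R) vs O(R*N)), though A's early exit can win on quickly-invalid updates.
import Mathlib
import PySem

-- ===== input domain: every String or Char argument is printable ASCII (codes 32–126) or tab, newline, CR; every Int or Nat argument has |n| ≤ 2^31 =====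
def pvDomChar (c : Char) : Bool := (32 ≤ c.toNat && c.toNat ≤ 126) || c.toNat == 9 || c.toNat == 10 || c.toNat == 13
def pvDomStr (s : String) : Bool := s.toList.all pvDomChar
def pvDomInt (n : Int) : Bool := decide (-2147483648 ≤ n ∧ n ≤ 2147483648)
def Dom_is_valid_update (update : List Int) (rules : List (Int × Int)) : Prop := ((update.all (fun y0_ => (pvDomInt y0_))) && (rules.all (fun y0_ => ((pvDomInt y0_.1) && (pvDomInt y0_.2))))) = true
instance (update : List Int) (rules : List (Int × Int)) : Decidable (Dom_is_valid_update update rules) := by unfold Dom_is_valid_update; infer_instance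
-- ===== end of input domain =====

-- B reverses the traversal: rules grouped once into must-follow sets, then one left-to-right
-- scan of the update with a seen-set. Intended as faster (one pass over rules and update instead
-- of per-rule scans); A's early exit can still win on invalid updates, so the measurement varies.

-- ===== PORT A =====
-- A: for each rule, membership scans and .index scans over update.
def is_valid_update (update : List Int) (rules : List (Int × Int)) : Bool :=
  match rules with
  | [] => true
  | rule :: rest =>
    let (before, after) := rule
    if update.contains before && update.contains after then
      match PySem.List.index? update before, PySem.List.index? update after with
      | some index_before, some index_after =>
        if index_after < index_before then false else is_valid_update update rest
      | _, _ => is_valid_update update rest   -- unreachable: both members, index? is some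
    else is_valid_update update rest

-- ===== PORT B =====
-- Source B: group rules by 'before' into a dict of must-follow sets, then one scan of update
def pvMustFollow (rules : List (Int × Int)) : PySem.Dict Int (PySem.Set Int) :=
  rules.foldl
    (fun d p => d.insert p.1 (PySem.Set.add (d.getD p.1 PySem.Set.empty) p.2))
    PySem.Dict.empty

def pvScan (mf : PySem.Dict Int (PySem.Set Int)) (seen : PySem.Set Int) : List Int → Bool
  | [] => true
  | page :: rest =>
    if PySem.Set.contains seen page then pvScan mf seen rest
    else if PySem.Set.isdisjoint (mf.getD page PySem.Set.empty) seen then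
      pvScan mf (PySem.Set.add seen page) rest
    else false

def is_valid_update_alt (update : List Int) (rules : List (Int × Int)) : Bool :=
  pvScan (pvMustFollow rules) PySem.Set.empty update

-- ===== PRECONDITION & SPEC =====
def Spec_is_valid_update (update : List Int) (rules : List (Int × Int)) (out : Bool) : Prop := out = is_valid_update_alt update rules
instance (update : List Int) (rules : List (Int × Int)) (out : Bool) : Decidable (Spec_is_valid_update update rules out) := by unfold Spec_is_valid_update; infer_instance

-- ===== CLAIM (what is proved, stated in full; the proofs are below) =====
def Claim_equal_is_valid_update : Prop := ∀ (update : List Int) (rules : List (Int × Int)), Dom_is_valid_update update rules → Spec_is_valid_update update rules (is_valid_update update rules)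

-- ===== LEMMAS AND PROOFS =====

-- A violating pair: b's first occurrence has a strictly before it.
def pvBadPair (u : List Int) (b a : Int) : Prop :=
  ∃ l r, u = l ++ b :: r ∧ b ∉ l ∧ a ∈ l

-- index-comparison form (A's test) ↔ split form
lemma pvBadPair_iff_index (u : List Int) (b a : Int) :
    pvBadPair u b a ↔ ∃ kb ka, PySem.List.index? u b = some kb ∧
      PySem.List.index? u a = some ka ∧ ka < kb := by
  constructor
  · rintro ⟨l, r, rfl, hbl, hal⟩
    have hb : PySem.List.index? (l ++ b :: r) b = some l.length :=
      (PySem.List.index?_eq_some_iff _ _ _).mpr ⟨l, r, rfl, rfl, hbl⟩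
    have ha0 : PySem.List.index? (l ++ b :: r) a = PySem.List.index? l a :=
      PySem.List.index?_append_of_mem _ hal
    obtain ⟨ka, hka⟩ := Option.isSome_iff_exists.mp
      ((PySem.List.index?_isSome_iff l a).mpr hal)
    obtain ⟨pre, suf, hls, hlen, -⟩ := (PySem.List.index?_eq_some_iff l a ka).mp hka
    refine ⟨l.length, ka, hb, ha0.trans hka, ?_⟩
    subst hls
    simp [← hlen]
  · rintro ⟨kb, ka, hb, ha, hlt⟩
    obtain ⟨pre, suf, rfl, hlen, hbpre⟩ := (PySem.List.index?_eq_some_iff u b kb).mp hb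
    obtain ⟨hka, hget, -⟩ := PySem.List.getElem_of_index?_eq_some ha
    refine ⟨pre, suf, rfl, hbpre, ?_⟩
    have hka' : ka < pre.length := hlen ▸ hlt
    have : (pre ++ b :: suf)[ka]'hka = pre[ka]'hka' := List.getElem_append_left hka'
    rw [this] at hget
    exact hget ▸ List.getElem_mem hka'

-- A returns true iff no rule is a violating pair
lemma pvA_iff (u : List Int) (rules : List (Int × Int)) :
    is_valid_update u rules = true ↔ ∀ p ∈ rules, ¬ pvBadPair u p.1 p.2 := by
  induction rules with
  | nil => simp [is_valid_update]
  | cons p rest ih =>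
    obtain ⟨b, a⟩ := p
    rw [is_valid_update]
    simp only [List.mem_cons, forall_eq_or_imp]
    constructor
    · intro h
      rw [pvBadPair_iff_index]
      by_cases hbad : ∃ kb ka, PySem.List.index? u b = some kb ∧
          PySem.List.index? u a = some ka ∧ ka < kb
      · exfalso
        obtain ⟨kb, ka, hkb, hka, hlt⟩ := hbad
        have hmb : u.contains b := by
          simpa using (PySem.List.index?_isSome_iff u b).mp (by rw [hkb]; rfl)
        have hma : u.contains a := by
          simpa using (PySem.List.index?_isSome_iff u a).mp (by rw [hka]; rfl)
        rw [hmb, hma] at h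
        simp only [Bool.and_self, if_true] at h
        rw [hkb, hka] at h
        simp [hlt] at h
      · constructor
        · exact hbad
        · rw [← ih]
          split at h
          · rename_i hmem
            cases hkb : PySem.List.index? u b with
            | none => rw [hkb] at h; cases hka : PySem.List.index? u a with
              | none => rw [hka] at h; exact h
              | some ka => rw [hka] at h; exact h
            | some kb => cases hka : PySem.List.index? u a with
              | none => rw [hkb, hka] at h; exact h
              | some ka =>
                rw [hkb, hka] at h
                have : ¬ ka < kb := fun hlt => hbad ⟨kb, ka, hkb, hka, hlt⟩
                simpa [this] using h
          · exact h
    · rintro ⟨hnb, hrest⟩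
      rw [pvBadPair_iff_index] at hnb
      split
      · cases hkb : PySem.List.index? u b with
        | none => exact (ih.mpr hrest)
        | some kb => cases hka : PySem.List.index? u a with
          | none => exact (ih.mpr hrest)
          | some ka =>
            have : ¬ ka < kb := fun hlt => hnb ⟨kb, ka, hkb, hka, hlt⟩
            simpa [this] using ih.mpr hrest
      · exact ih.mpr hrest

-- the "no violation yet" condition for B's scan; pref abstracts the processed prefix
def pvNoViol (rules : List (Int × Int)) (pref rest : List Int) : Prop :=
  ∀ b a l r, rest = l ++ b :: r → b ∉ pref ++ l → a ∈ pref ++ l → (b, a) ∉ rules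

lemma pvNoViol_cons (rules : List (Int × Int)) (pref : List Int) (page : Int)
    (rest : List Int) :
    pvNoViol rules pref (page :: rest) ↔
      ((page ∉ pref → ∀ a ∈ pref, (page, a) ∉ rules) ∧ pvNoViol rules (pref ++ [page]) rest) := by
  constructor
  · intro h
    refine ⟨fun hnp a ha => h page a [] rest rfl (by simpa using hnp) (by simpa using ha), ?_⟩
    intro b a l r hsplit hbl hal
    refine h b a (page :: l) r (by simp [hsplit]) ?_ ?_
    · intro hb; apply hbl
      simp only [List.mem_append, List.mem_cons] at hb ⊢; tauto
    · simp only [List.mem_append, List.mem_cons] at hal ⊢; tauto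
  · rintro ⟨h0, h⟩ b a l r hsplit hbl hal
    cases l with
    | nil =>
      simp only [List.nil_append, List.cons.injEq] at hsplit
      obtain ⟨rfl, rfl⟩ := hsplit
      simp only [List.append_nil] at hbl hal
      exact h0 hbl a hal
    | cons x l' =>
      simp only [List.cons_append, List.cons.injEq] at hsplit
      obtain ⟨rfl, hsplit'⟩ := hsplit
      refine h b a l' r hsplit' ?_ ?_
      · intro hb; apply hbl
        simp only [List.mem_append, List.mem_cons] at hb ⊢; tauto
      · simp only [List.mem_append, List.mem_cons] at hal ⊢; tauto

-- the grouping dict: a ∈ must_follow[b] ↔ (b, a) is a rule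
lemma pvMem_mustFollowAux (rs : List (Int × Int)) :
    ∀ (d : PySem.Dict Int (PySem.Set Int)) (b a : Int),
      (a ∈ (rs.foldl
        (fun d p => d.insert p.1 (PySem.Set.add (d.getD p.1 PySem.Set.empty) p.2)) d).getD
          b PySem.Set.empty) ↔ a ∈ d.getD b PySem.Set.empty ∨ (b, a) ∈ rs := by
  induction rs with
  | nil => intro d b a; simp
  | cons p rs ih =>
    intro d b a
    obtain ⟨b', a'⟩ := p
    simp only [List.foldl_cons]
    rw [ih]
    rw [PySem.Dict.getD_insert]
    by_cases hb : b = b'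
    · subst hb
      simp only [PySem.Set.mem_add, List.mem_cons, Prod.mk.injEq, if_pos trivial]
      tauto
    · simp only [if_neg hb, List.mem_cons, Prod.mk.injEq]
      tauto

lemma pvMem_mustFollow (rules : List (Int × Int)) (b a : Int) :
    a ∈ (pvMustFollow rules).getD b PySem.Set.empty ↔ (b, a) ∈ rules := by
  unfold pvMustFollow
  rw [pvMem_mustFollowAux]
  simp [PySem.Dict.getD_empty, PySem.Set.empty]

-- B's scan, generalized: seen has the same members as the already-processed prefix
lemma pvScan_iff (rules : List (Int × Int)) :
    ∀ (rest : List Int) (seen : PySem.Set Int) (pref : List Int),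
      (∀ e, e ∈ seen ↔ e ∈ pref) →
      (pvScan (pvMustFollow rules) seen rest = true ↔ pvNoViol rules pref rest) := by
  intro rest
  induction rest with
  | nil =>
    intro seen pref _
    simp only [pvScan, true_iff]
    intro b a l r hsplit
    exact absurd hsplit (by simp)
  | cons page rest ih =>
    intro seen pref hinv
    rw [pvScan, pvNoViol_cons]
    by_cases hmem : page ∈ pref
    · have hc : PySem.Set.contains seen page = true := by
        simp [(hinv page).mpr hmem]
      rw [hc, if_pos rfl]
      rw [ih seen (pref ++ [page]) (fun e => by
        rw [hinv e]; simp only [List.mem_append, List.mem_cons, List.not_mem_nil]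
        constructor
        · exact fun h => Or.inl h
        · rintro (h | h)
          · exact h
          · simp at h; subst h; exact hmem)]
      constructor
      · exact fun h => ⟨fun hnp => absurd hmem hnp, h⟩
      · exact fun h => h.2
    · have hc : PySem.Set.contains seen page = false := by
        simp only [PySem.Set.contains_eq_listContains, List.contains_eq_mem,
          decide_eq_false_iff_not]
        exact fun h => hmem ((hinv page).mp h)
      rw [hc]
      simp only [Bool.false_eq_true, if_false]
      by_cases hviol : ∃ e ∈ pref, (page, e) ∈ rules
      · have hdis : PySem.Set.isdisjoint ((pvMustFollow rules).getD page PySem.Set.empty)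
            seen = false := by
          obtain ⟨e, hep, her⟩ := hviol
          by_contra hne
          have : PySem.Set.isdisjoint ((pvMustFollow rules).getD page PySem.Set.empty)
              seen = true := by
            cases h : PySem.Set.isdisjoint ((pvMustFollow rules).getD page PySem.Set.empty) seen
            · exact absurd h hne
            · rfl
          exact (PySem.Set.isdisjoint_iff _ _).mp this e
            ((pvMem_mustFollow rules page e).mpr her) ((hinv e).mpr hep)
        rw [hdis]
        simp only [Bool.false_eq_true, if_false, false_iff]
        rintro ⟨h0, -⟩
        obtain ⟨e, hep, her⟩ := hviol
        exact absurd her (h0 hmem e hep)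
      · have hdis : PySem.Set.isdisjoint ((pvMustFollow rules).getD page PySem.Set.empty)
            seen = true := by
          rw [PySem.Set.isdisjoint_iff]
          intro x hx hxs
          exact hviol ⟨x, (hinv x).mp hxs, (pvMem_mustFollow rules page x).mp hx⟩
        rw [hdis, if_pos rfl]
        rw [ih (PySem.Set.add seen page) (pref ++ [page]) (fun e => by
          rw [PySem.Set.mem_add]
          simp only [List.mem_append, List.mem_cons, List.not_mem_nil, hinv e]
          tauto)]
        constructor
        · exact fun h => ⟨fun _ a ha har => hviol ⟨a, ha, har⟩, h⟩
        · exact fun h => h.2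

-- B returns true iff no rule is a violating pair
lemma pvB_iff (u : List Int) (rules : List (Int × Int)) :
    is_valid_update_alt u rules = true ↔ ∀ p ∈ rules, ¬ pvBadPair u p.1 p.2 := by
  unfold is_valid_update_alt
  rw [pvScan_iff rules u PySem.Set.empty [] (fun e => by simp [PySem.Set.empty])]
  unfold pvNoViol
  constructor
  · rintro h ⟨b, a⟩ hp ⟨l, r, rfl, hbl, hal⟩
    exact h b a l r rfl (by simpa using hbl) (by simpa using hal) hp
  · intro h b a l r hsplit hbl hal hmem
    exact h (b, a) hmem ⟨l, r, hsplit, by simpa using hbl, by simpa using hal⟩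

-- ===== VERDICT (by name: the statement is the Claim_ definition above) =====
theorem is_valid_update_spec : Claim_equal_is_valid_update := by
  intro update rules _
  unfold Spec_is_valid_update
  rw [Bool.eq_iff_iff, pvA_iff, pvB_iff]
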